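-- pv_equiv track=rewrite | github.com/williamjedrzejczak/CS-149 | Project 1, Dice/dice.py | add_values
-- ===== SOURCE A (Python) =====
-- FACE_VALUES = {"9": 9, "10": 10, "J": 10, "Q": 10, "K": 10, "A": 11}
--
-- def are_valid(diceresults):
--     """
--     Check list is valid.
--
--     Args:
--         diceresults (list): A list.
--
--     Returns:
--         bool: True or False.
--     """
--     if diceresults is None:
--         return False
--     if len(diceresults) < 1 or len(diceresults) > 10:
--         return False
--     accepted_vals = {'9', '10', 'J', 'Q', 'K', 'A'}
--     for die in diceresults:
--         if die not in accepted_vals: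
--             return False
--
--     return True
--
-- def add_values(diceresults):
--     """
--     Calculate the total value.
--
--     Args:
--         diceresults (list): A list of dice
--
--     Returns:
--         int: The sum
--     """
--     if not are_valid(diceresults):
--         return -1
--     total_value = 0
--     for eachdice in diceresults:
--         if eachdice in FACE_VALUES:
--             total_value += FACE_VALUES[eachdice]
--     return total_value
-- ===== SOURCE B (Python) =====
-- FACE_VALUES = {"9": 9, "10": 10, "J": 10, "Q": 10, "K": 10, "A": 11}
--
-- def add_values(diceresults):
--     if diceresults is None or not (1 <= len(diceresults) <= 10):
--         return -1
--     total = 0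
--     try:
--         for die in diceresults:
--             total += FACE_VALUES[die]
--     except KeyError:
--         return -1
--     return total
-- ===== Notes on version B (the rewrite author's own statement) =====
-- stated objective: simpler
-- what changed: Replaces the separate validation pass (are_valid) plus a second summation pass with one exception-guarded pass that sums FACE_VALUES[die] directly and returns -1 on the first unknown face.
import Mathlib
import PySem

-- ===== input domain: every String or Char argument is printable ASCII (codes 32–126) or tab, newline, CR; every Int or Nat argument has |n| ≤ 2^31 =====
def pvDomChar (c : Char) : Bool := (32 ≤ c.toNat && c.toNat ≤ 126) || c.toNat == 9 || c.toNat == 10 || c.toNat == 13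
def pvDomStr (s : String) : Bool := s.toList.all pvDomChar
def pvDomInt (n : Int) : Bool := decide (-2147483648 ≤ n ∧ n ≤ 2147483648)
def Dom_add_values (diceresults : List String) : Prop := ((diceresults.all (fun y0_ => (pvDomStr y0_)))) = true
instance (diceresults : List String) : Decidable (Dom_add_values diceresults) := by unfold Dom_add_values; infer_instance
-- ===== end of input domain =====

-- B merges A's two passes (validation, then summation) into one lookup pass that aborts with -1 on the first unknown face; return value proved identical.

-- ===== PORT A =====
-- the FACE_VALUES dict (insertion order)
def faceValues : PySem.Dict String Int :=
  PySem.Dict.ofList [("9", 9), ("10", 10), ("J", 10), ("Q", 10), ("K", 10), ("A", 11)]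

-- the accepted_vals set literal
def acceptedVals : PySem.Set String := PySem.Set.ofList ["9", "10", "J", "Q", "K", "A"]

-- are_valid: the guards, then the membership loop with early return False
def are_valid (diceresults : List String) : Bool :=
  if diceresults.length < 1 || diceresults.length > 10 then false
  else diceresults.all (fun die => decide (die ∈ acceptedVals))

def add_values (diceresults : List String) : Int :=
  if !are_valid diceresults then -1
  else diceresults.foldl (fun total eachdice =>
    if (faceValues.get? eachdice).isSome then total + (faceValues.get? eachdice).getD 0
    else total) 0

-- ===== PORT B =====
-- the try-body: forward accumulation, none = KeyError escaped
def sumLoop (total : Int) : List String → Option Int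
  | [] => some total
  | die :: rest =>
    match faceValues.get? die with
    | none => none
    | some v => sumLoop (total + v) rest

def add_values_alt (diceresults : List String) : Int :=
  if diceresults.length < 1 || diceresults.length > 10 then -1
  else
    match sumLoop 0 diceresults with
    | none => -1
    | some t => t

-- ===== PRECONDITION & SPEC =====
def Spec_add_values (diceresults : List String) (out : Int) : Prop := out = add_values_alt diceresults
instance (diceresults : List String) (out : Int) : Decidable (Spec_add_values diceresults out) := by unfold Spec_add_values; infer_instance

-- ===== CLAIM (what is proved, stated in full; the proofs are below) =====
def Claim_equal_add_values : Prop := ∀ (diceresults : List String), Dom_add_values diceresults → Spec_add_values diceresults (add_values diceresults)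

-- ===== LEMMAS AND PROOFS =====

-- acceptedVals membership coincides with faceValues key lookup
theorem mem_accepted_iff (s : String) :
    (decide (s ∈ acceptedVals) : Bool) = (faceValues.get? s).isSome := by
  have hfv : faceValues =
      PySem.Dict.mk [("9", 9), ("10", 10), ("J", 10), ("Q", 10), ("K", 10), ("A", 11)] := by
    decide
  by_cases h9 : s = "9"
  · subst h9; decide
  by_cases h10 : s = "10"
  · subst h10; decide
  by_cases hJ : s = "J"
  · subst hJ; decide
  by_cases hQ : s = "Q"
  · subst hQ; decide
  by_cases hK : s = "K"
  · subst hK; decide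
  by_cases hA : s = "A"
  · subst hA; decide
  have n9 : ¬ ("9" = s) := fun h => h9 h.symm
  have n10 : ¬ ("10" = s) := fun h => h10 h.symm
  have nJ : ¬ ("J" = s) := fun h => hJ h.symm
  have nQ : ¬ ("Q" = s) := fun h => hQ h.symm
  have nK : ¬ ("K" = s) := fun h => hK h.symm
  have nA : ¬ ("A" = s) := fun h => hA h.symm
  simp [acceptedVals, PySem.Set.ofList, hfv, PySem.Dict.get?,
    h9, h10, hJ, hQ, hK, hA, n9, n10, nJ, nQ, nK, nA]

-- when every die is a key, the forward accumulation equals A's fold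
theorem sumLoop_eq_foldl (l : List String) (t : Int)
    (h : l.all (fun die => decide (die ∈ acceptedVals)) = true) :
    sumLoop t l = some (l.foldl (fun total eachdice =>
      if (faceValues.get? eachdice).isSome then total + (faceValues.get? eachdice).getD 0
      else total) t) := by
  induction l generalizing t with
  | nil => simp [sumLoop]
  | cons d rest ih =>
    simp only [List.all_cons, Bool.and_eq_true] at h
    obtain ⟨hd, hrest⟩ := h
    rw [mem_accepted_iff] at hd
    cases hv : faceValues.get? d with
    | none => simp [hv] at hd
    | some v =>
      simp only [sumLoop, List.foldl_cons, hv, Option.isSome_some, if_pos, Option.getD_some]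
      exact ih _ hrest

-- when some die is not a key, the forward accumulation aborts
theorem sumLoop_none (l : List String) (t : Int)
    (h : l.all (fun die => decide (die ∈ acceptedVals)) = false) :
    sumLoop t l = none := by
  induction l generalizing t with
  | nil => simp at h
  | cons d rest ih =>
    simp only [List.all_cons, Bool.and_eq_false_iff] at h
    cases hv : faceValues.get? d with
    | none => simp [sumLoop, hv]
    | some v =>
      simp only [sumLoop, hv]
      apply ih
      rcases h with h | h
      · rw [mem_accepted_iff, hv] at h; simp at h
      · exact h

-- ===== VERDICT (by name: the statement is the Claim_ definition above) =====
theorem add_values_spec : Claim_equal_add_values := by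
  intro l _
  show add_values l = add_values_alt l
  by_cases hlen : l.length < 1 ∨ l.length > 10
  · have hc : (decide (l.length < 1) || decide (l.length > 10)) = true := by
      rcases hlen with h | h
      · rw [decide_eq_true h]; simp
      · rw [decide_eq_true h]; simp
    have hA : are_valid l = false := by unfold are_valid; rw [if_pos hc]
    unfold add_values add_values_alt
    rw [hA, if_pos (by simp), if_pos hc]
  · push Not at hlen
    have hc : (decide (l.length < 1) || decide (l.length > 10)) = false := by
      rw [decide_eq_false (by omega : ¬ l.length < 1),
        decide_eq_false (by omega : ¬ l.length > 10)]
      rfl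
    have hnc := ne_true_of_eq_false hc
    have hA : are_valid l = l.all (fun die => decide (die ∈ acceptedVals)) := by
      unfold are_valid; rw [if_neg hnc]
    cases hall : l.all (fun die => decide (die ∈ acceptedVals)) with
    | true =>
      unfold add_values add_values_alt
      rw [hA, hall, if_neg (by simp), if_neg hnc, sumLoop_eq_foldl l 0 hall]
    | false =>
      unfold add_values add_values_alt
      rw [hA, hall, if_pos (by simp), if_neg hnc, sumLoop_none l 0 hall]
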